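-- pv_equiv track=rewrite | github.com/germainhirwa/kattis | src/Primary X-Subfactor Series/pxs.py | xsf
-- ===== SOURCE A (Python) =====
-- mem = {}
--
-- def ps(n):
--     if n in mem: return mem[n]
--     s = ['']
--     for i in str(n):
--         s2 = []
--         for j in s: s2.append(j), s2.append(j+i)
--         s = s2
--     mem[n] = {*map(int, s[1:])}; return mem[n]
--
-- mem2 = {}
--
-- def xsf(n):
--     if n in mem2: return mem2[n]
--     p, x, m = ps(n), [], str(n)
--     for s in [str(i) for i in p if n>i>1 and n%i == 0]:
--         # discard digits of s from m
--         y, m2 = [], [*m]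
--         def bt(c, k):
--             if not c:
--                 if m2: y.append(int(''.join(m2)))
--                 return
--             for i in range(k, len(m2)):
--                 u = m2[i]
--                 if u == c[-1]: c.pop(), m2.pop(i), bt(c, i), m2.insert(i, u), c.append(u)
--                 bt(c, i+1)
--         bt([*s[::-1]], 0), x.extend(y)
--     mem2[n] = {*x}; return mem2[n]
-- ===== SOURCE B (Python) =====
-- mem = {}
--
-- def ps(n):
--     if n in mem: return mem[n]
--     s = ['']
--     for i in str(n):
--         s2 = []
--         for j in s: s2.append(j), s2.append(j+i)
--         s = s2
--     mem[n] = {*map(int, s[1:])}; return mem[n]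
--
-- def combos(xs, r):
--     # all r-element subsequences of xs, in lexicographic (itertools.combinations) order
--     if r == 0: return [[]]
--     if not xs: return []
--     first, rest = xs[0], xs[1:]
--     return [[first] + c for c in combos(rest, r - 1)] + combos(rest, r)
--
-- mem2b = {}
--
-- def xsf(n):
--     if n in mem2b: return mem2b[n]
--     m = str(n)
--     x = set()
--     for i in ps(n):
--         if n > i > 1 and n % i == 0:
--             s = str(i)
--             for pos in combos(list(range(len(m))), len(s)):
--                 if [m[j] for j in pos] == list(s):
--                     rest = [m[j] for j in range(len(m)) if j not in pos]
--                     if rest: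
--                         x.add(int(''.join(rest)))
--     mem2b[n] = x
--     return x
-- ===== Notes on version B (the rewrite author's own statement) =====
-- stated objective: alternative
-- what changed: A removes the divisor's digits from str(n) by an exponential mutating backtracking (bt recurses twice per index and re-explores every suffix, collecting massive duplicates into a list that is deduplicated at the end); B instead flatly enumerates each r-element position subset of str(n) exactly once in itertools.combinations order, keeps those spelling the divisor, and adds the non-empty leftovers to a set.
import Mathlib
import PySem

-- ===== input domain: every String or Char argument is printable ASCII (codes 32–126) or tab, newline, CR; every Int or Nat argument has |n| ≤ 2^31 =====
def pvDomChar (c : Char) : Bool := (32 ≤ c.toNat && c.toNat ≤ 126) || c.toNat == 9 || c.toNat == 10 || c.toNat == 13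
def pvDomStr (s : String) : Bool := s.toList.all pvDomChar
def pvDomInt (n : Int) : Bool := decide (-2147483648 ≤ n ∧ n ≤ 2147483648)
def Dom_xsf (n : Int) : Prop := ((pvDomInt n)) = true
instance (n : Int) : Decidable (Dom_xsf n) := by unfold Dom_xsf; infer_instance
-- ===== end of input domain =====

-- B replaces A's redundant mutating backtracking by a flat enumeration of position
-- subsets (itertools.combinations-style, hand-rolled since A imports nothing), visiting
-- each subset once; objective: alternative.  The Python return value is a set; Python's
-- set ITERATION order is not modelled, so both ports iterate the ps-set in first-insertion
-- order (the returned set's CONTENTS do not depend on that order).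

-- ===== PORT A =====
-- int(''.join(cs)) for cs a nonempty list of decimal digits (the only shape reached
-- under Pre_: leftovers of str(n), n ≥ 0); ofChars? is `some` there, getD 0 is never hit.
def pyInt (cs : List Char) : Int := (PySem.Int.ofChars? cs).getD 0

-- ps(n): set of int(t) over all nonempty subsequences t of str(n) (memo dict dropped: pure).
def psA (n : Int) : List Int :=
  let s : List (List Char) :=
    (PySem.Int.toChars n).foldl (fun s i => s.foldl (fun s2 j => s2 ++ [j] ++ [j ++ [i]]) []) [[]]
  PySem.Set.ofList ((s.drop 1).map pyInt)

-- bt(c, k) with current digit list m2: `btA` is bt's body (the `if not c` test), `btALoop`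
-- is its `for i in range(k, len(m2))` loop written as recursion on i (the loop tail from
-- i+1 is btALoop c (i+1) m2); the returned list is the sequence of values bt appends to y.
-- Backtracking state (c.pop/m2.pop(i)/…insert/append) is restoration-free here: each
-- recursive call just receives the popped lists, the originals are reused afterwards.
mutual
def btA (c : List Char) (k : Nat) (m2 : List Char) : List Int :=
  if hc : c = [] then (if m2 ≠ [] then [pyInt m2] else []) else btALoop c hc k m2
  termination_by (c.length, m2.length - k, 1)
  decreasing_by simp_wf; apply Prod.Lex.right; apply Prod.Lex.right; omega
def btALoop (c : List Char) (hc : c ≠ []) (k : Nat) (m2 : List Char) : List Int :=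
  if h : k < m2.length then
    (if m2.getD k ' ' = c.getLastD ' ' then btA c.dropLast k (m2.eraseIdx k) else [])
      ++ btA c (k + 1) m2 ++ btALoop c hc (k + 1) m2
  else []
  termination_by (c.length, m2.length - k, 0)
  decreasing_by
    all_goals simp_wf
    all_goals first
      | (apply Prod.Lex.right; apply Prod.Lex.left; omega)
      | (apply Prod.Lex.left
         cases c with
         | nil => exact absurd rfl hc
         | cons a t => simp [List.length_dropLast]; try omega)
      | (apply Prod.Lex.right; apply Prod.Lex.right; omega)
end

def xsf (n : Int) : List Int :=
  let p := psA n
  let m := PySem.Int.toChars n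
  -- [str(i) for i in p if n > i > 1 and n % i == 0]
  let divs := (p.filter (fun i => decide (i < n) && decide (1 < i) && decide (PySem.Int.mod n i = 0))).map PySem.Int.toChars
  -- for s in divs: bt([*s[::-1]], 0) on m2 = [*m]; x.extend(y)
  let x := divs.foldl (fun x s => x ++ btA s.reverse 0 m) []
  PySem.Set.ofList x

-- ===== PORT B =====
-- combos(xs, r): all r-element subsequences of xs in itertools.combinations order.
def combosB (xs : List Nat) (r : Nat) : List (List Nat) :=
  match r, xs with
  | 0, _ => [[]]
  | _ + 1, [] => []
  | r + 1, y :: t => (combosB t r).map (y :: ·) ++ combosB t (r + 1)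

def xsf_alt (n : Int) : List Int :=
  let m := PySem.Int.toChars n
  (psA n).foldl (fun x i =>
    if decide (i < n) && decide (1 < i) && decide (PySem.Int.mod n i = 0) then
      let s := PySem.Int.toChars i
      (combosB (List.range m.length) s.length).foldl (fun x pos =>
        if pos.map (fun j => m.getD j ' ') = s then
          let rest := ((List.range m.length).filter (fun j => ¬ pos.contains j)).map (fun j => m.getD j ' ')
          if rest ≠ [] then PySem.Set.add x (pyInt rest) else x
        else x) x
    else x) PySem.Set.empty

-- ===== PRECONDITION & SPEC =====
-- A (and B) raise ValueError for negative n: ps maps int() over digit subsequences of str(n),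
-- and the subsequence "-" of a negative n's string is not a number.  Pre_ excludes exactly those.
def Pre_xsf (n : Int) : Prop := 0 ≤ n
instance (n : Int) : Decidable (Pre_xsf n) := by unfold Pre_xsf; infer_instance
def pvWitness_xsf : Int := 36

def Spec_xsf (n : Int) (out : List Int) : Prop := out = xsf_alt n
instance (n : Int) (out : List Int) : Decidable (Spec_xsf n out) := by unfold Spec_xsf; infer_instance

-- ===== CLAIM (what is proved, stated in full; the proofs are below) =====
def Claim_equal_xsf : Prop := ∀ (n : Int), Dom_xsf n → Pre_xsf n → Spec_xsf n (xsf n)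

-- ===== LEMMAS AND PROOFS =====

-- E d pre suf: the per-divisor value sequence in lexicographic position order — match the
-- pattern d inside suf left to right, pre = digits already kept for the leftover.
def Epat : List Char → List Char → List Char → List Int
  | [], pre, suf => if pre ++ suf ≠ [] then [pyInt (pre ++ suf)] else []
  | _ :: _, _, [] => []
  | c :: d, pre, u :: rest =>
      (if u = c then Epat d pre rest else []) ++ Epat (c :: d) (pre ++ [u]) rest
termination_by d _ suf => (d.length, suf.length)
decreasing_by all_goals simp_wf <;> omega

-- position-level analogue: the increasing position sequences (within index list xs) spelling d
def Cpos (m : List Char) : List Char → List Nat → List (List Nat)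
  | [], _ => [[]]
  | _ :: _, [] => []
  | c :: d, y :: t =>
      (if m.getD y ' ' = c then (Cpos m d t).map (y :: ·) else []) ++ Cpos m (c :: d) t

-- character-level analogue: the corresponding leftovers (within suf)
def Cchr : List Char → List Char → List (List Char)
  | [], suf => [suf]
  | _ :: _, [] => []
  | c :: d, u :: rest =>
      (if u = c then Cchr d rest else []) ++ (Cchr (c :: d) rest).map (u :: ·)
termination_by d suf => (d.length, suf.length)
decreasing_by all_goals simp_wf <;> omega

-- --- small list facts specific to the ports' index/append shapes ---
theorem getD_append_len (pre l : List Char) (u : Char) (d : Char) :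
    (pre ++ u :: l).getD pre.length d = u := by
  induction pre with
  | nil => rfl
  | cons a p ih => simpa using ih

theorem eraseIdx_append_len (pre l : List Char) (u : Char) :
    (pre ++ u :: l).eraseIdx pre.length = pre ++ l := by
  induction pre with
  | nil => rfl
  | cons a p ih => simpa using ih

theorem getLastD_append_singleton (l : List Char) (a d : Char) :
    (l ++ [a]).getLastD d = a := by
  induction l with
  | nil => rfl
  | cons b t ih => simpa [List.getLastD] using ih

-- --- Set.update facts ---
theorem update_append_int (s a b : List Int) :
    PySem.Set.update s (a ++ b) = PySem.Set.update (PySem.Set.update s a) b := by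
  simp [PySem.Set.update, List.foldl_append]

theorem mem_add_int (s : List Int) (x y : Int) (h : y ∈ s ∨ y = x) :
    y ∈ PySem.Set.add s x := by
  rcases h with h | rfl
  · by_cases hx : x ∈ s <;> simp [PySem.Set.add, hx, h]
  · by_cases hx : y ∈ s <;> simp [PySem.Set.add, hx]

theorem add_of_mem_int (s : List Int) (x : Int) (h : x ∈ s) : PySem.Set.add s x = s := by
  simp [PySem.Set.add, h]

theorem mem_update_int (l : List Int) : ∀ (s : List Int) (x : Int),
    (x ∈ s ∨ x ∈ l) → x ∈ PySem.Set.update s l := by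
  induction l with
  | nil =>
      intro s x h
      have hx : x ∈ s := by tauto
      simpa [PySem.Set.update] using hx
  | cons a l ih =>
      intro s x h
      show x ∈ PySem.Set.update (PySem.Set.add s a) l
      apply ih
      rcases h with h | h
      · exact Or.inl (mem_add_int s a x (Or.inl h))
      · rcases List.mem_cons.mp h with rfl | h
        · exact Or.inl (mem_add_int s x x (Or.inr rfl))
        · exact Or.inr h

theorem update_of_subset_int (s l : List Int) (h : ∀ x ∈ l, x ∈ s) :
    PySem.Set.update s l = s := by
  induction l generalizing s with
  | nil => simp [PySem.Set.update]
  | cons x l ih =>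
      show PySem.Set.update (PySem.Set.add s x) l = s
      rw [add_of_mem_int s x (h x (by simp))]
      exact ih s (fun y hy => h y (by simp [hy]))

theorem update_update_self_int (s l : List Int) :
    PySem.Set.update (PySem.Set.update s l) l = PySem.Set.update s l := by
  exact update_of_subset_int _ _ (fun x hx => mem_update_int l s x (Or.inr hx))

-- --- unfolding equations for the mutual A-side loop ---
theorem btA_nil (k : Nat) (m2 : List Char) :
    btA [] k m2 = if m2 ≠ [] then [pyInt m2] else [] := by
  rw [btA]; simp

theorem btA_cons (c : List Char) (hc : c ≠ []) (k : Nat) (m2 : List Char) :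
    btA c k m2 = btALoop c hc k m2 := by
  rw [btA]; simp [hc]

theorem btALoop_lt (c : List Char) (hc : c ≠ []) (k : Nat) (m2 : List Char)
    (h : k < m2.length) :
    btALoop c hc k m2 =
      (if m2.getD k ' ' = c.getLastD ' ' then btA c.dropLast k (m2.eraseIdx k) else [])
        ++ btA c (k + 1) m2 ++ btALoop c hc (k + 1) m2 := by
  rw [btALoop]; simp [h]

theorem btALoop_ge (c : List Char) (hc : c ≠ []) (k : Nat) (m2 : List Char)
    (h : ¬ k < m2.length) : btALoop c hc k m2 = [] := by
  rw [btALoop]; simp [h]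

-- --- main backtracking ↔ Epat (as updates of an arbitrary accumulator) ---
theorem btA_update (d pre suf : List Char) (acc : List Int) :
    PySem.Set.update acc (btA d.reverse pre.length (pre ++ suf)) =
      PySem.Set.update acc (Epat d pre suf) := by
  match d, suf with
  | [], suf =>
      rw [show (List.reverse ([] : List Char)) = [] from rfl, btA_nil]
      rw [show Epat [] pre suf = if pre ++ suf ≠ [] then [pyInt (pre ++ suf)] else [] from by
        rw [Epat]]
  | c :: d', [] =>
      have hrev : (c :: d').reverse ≠ [] := by simp
      rw [List.append_nil, btA_cons _ hrev, btALoop_ge _ _ _ _ (by omega)]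
      rw [show Epat (c :: d') pre [] = [] from by rw [Epat]]
  | c :: d', u :: rest =>
      have hrev : (c :: d').reverse ≠ [] := by simp
      have hk : pre.length < (pre ++ u :: rest).length := by simp
      rw [btA_cons _ hrev, btALoop_lt _ hrev _ _ hk]
      rw [getD_append_len]
      rw [show ((c :: d').reverse).getLastD ' ' = c from by
        rw [List.reverse_cons]; exact getLastD_append_singleton _ _ _]
      rw [show ((c :: d').reverse).dropLast = d'.reverse from by
        rw [List.reverse_cons]; exact List.dropLast_concat]
      rw [eraseIdx_append_len]
      rw [← btA_cons _ hrev (pre.length + 1) (pre ++ u :: rest)]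
      rw [update_append_int, update_append_int, update_update_self_int]
      have IH2 :
          PySem.Set.update
              (PySem.Set.update acc (if u = c then btA d'.reverse pre.length (pre ++ rest) else []))
              (btA (c :: d').reverse (pre.length + 1) (pre ++ u :: rest)) =
            PySem.Set.update
              (PySem.Set.update acc (if u = c then btA d'.reverse pre.length (pre ++ rest) else []))
              (Epat (c :: d') (pre ++ [u]) rest) := by
        have h1 : pre ++ u :: rest = (pre ++ [u]) ++ rest := by simp
        have h2 : pre.length + 1 = (pre ++ [u]).length := by simp
        rw [h1, h2]
        exact btA_update (c :: d') (pre ++ [u]) rest _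
      rw [IH2]
      rw [show Epat (c :: d') pre (u :: rest) =
            (if u = c then Epat d' pre rest else []) ++ Epat (c :: d') (pre ++ [u]) rest from by
        rw [Epat]]
      rw [update_append_int]
      have hX : PySem.Set.update acc (if u = c then btA d'.reverse pre.length (pre ++ rest) else [])
          = PySem.Set.update acc (if u = c then Epat d' pre rest else []) := by
        by_cases hu : u = c
        · rw [if_pos hu, if_pos hu]
          exact btA_update d' pre rest acc
        · rw [if_neg hu, if_neg hu]
      rw [hX]
  termination_by (d.length, suf.length)
  decreasing_by
    all_goals simp_wf
    all_goals omega

-- --- combinations pipeline ↔ Cpos / Cchr / Epat ---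
theorem combosB_filter (m : List Char) (d : List Char) (xs : List Nat) :
    (combosB xs d.length).filter (fun pos => decide (pos.map (fun j => m.getD j ' ') = d)) =
      Cpos m d xs := by
  induction xs generalizing d with
  | nil =>
      match d with
      | [] => simp [combosB, Cpos]
      | c :: d' => simp [combosB, Cpos]
  | cons y t ih =>
      match d with
      | [] => simp [combosB, Cpos]
      | c :: d' =>
          rw [show combosB (y :: t) (c :: d').length =
                (combosB t d'.length).map (y :: ·) ++ combosB t (d'.length + 1) from by
            simp [combosB]]
          rw [List.filter_append, Cpos]
          by_cases hy : m.getD y ' ' = c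
          · rw [if_pos hy]
            congr 1
            · rw [List.filter_map]
              rw [show ((fun pos => decide (List.map (fun j => m.getD j ' ') pos = c :: d')) ∘
                    (y :: ·)) = (fun pos => decide (List.map (fun j => m.getD j ' ') pos = d')) from by
                funext q
                simp only [Function.comp_apply, List.map_cons, hy]
                simp [List.cons.injEq]]
              rw [ih d']
            · exact ih (c :: d')
          · rw [if_neg hy]
            have h0 : ((combosB t d'.length).map (y :: ·)).filter
                (fun pos => decide (List.map (fun j => m.getD j ' ') pos = c :: d')) = [] := by
              apply List.filter_eq_nil_iff.mpr
              intro pos hpos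
              simp only [List.mem_map] at hpos
              obtain ⟨q, _, rfl⟩ := hpos
              simp only [List.map_cons, decide_eq_true_eq, List.cons.injEq]
              intro hcontr
              exact hy hcontr.1
            rw [h0, List.nil_append]
            exact ih (c :: d')

theorem mem_Cpos_mem (m : List Char) (d : List Char) (xs : List Nat) (pos : List Nat)
    (hpos : pos ∈ Cpos m d xs) : ∀ e ∈ pos, e ∈ xs := by
  induction xs generalizing d pos with
  | nil =>
      match d with
      | [] => simp [Cpos] at hpos; simp [hpos]
      | c :: d' => simp [Cpos] at hpos
  | cons y t ih =>
      match d with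
      | [] =>
          simp [Cpos] at hpos; simp [hpos]
      | c :: d' =>
          rw [Cpos] at hpos
          rcases List.mem_append.mp hpos with h | h
          · by_cases hy : m.getD y ' ' = c
            · rw [if_pos hy] at h
              simp only [List.mem_map] at h
              obtain ⟨q, hq, rfl⟩ := h
              intro e he
              rcases List.mem_cons.mp he with rfl | he'
              · exact List.mem_cons_self ..
              · exact List.mem_cons_of_mem _ (ih d' q hq e he')
            · rw [if_neg hy] at h; simp at h
          · intro e he
            exact List.mem_cons_of_mem _ (ih (c :: d') pos h e he)

theorem map_getD_range'_aux (m : List Char) : ∀ (k b : Nat), b + k = m.length →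
    (List.range' b k).map (fun j => m.getD j ' ') = m.drop b := by
  intro k
  induction k with
  | zero =>
      intro b hb
      rw [List.range'_zero, List.map_nil, List.drop_eq_nil_of_le (by omega)]
  | succ k ihk =>
      intro b hb
      rw [List.range'_succ, List.map_cons, ihk (b + 1) (by omega)]
      rw [List.drop_eq_getElem_cons (show b < m.length by omega), List.getD_eq_getElem?_getD,
        List.getElem?_eq_getElem (show b < m.length by omega)]
      rfl

theorem map_getD_range' (m : List Char) (a : Nat) :
    (List.range' a (m.length - a)).map (fun j => m.getD j ' ') = m.drop a := by
  by_cases h : a ≤ m.length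
  · exact map_getD_range'_aux m (m.length - a) a (by omega)
  · rw [show m.length - a = 0 from by omega, List.range'_zero, List.map_nil,
      List.drop_eq_nil_of_le (by omega)]

theorem Cpos_leftover (m : List Char) (d : List Char) (a : Nat) :
    (Cpos m d (List.range' a (m.length - a))).map
        (fun pos => ((List.range' a (m.length - a)).filter (fun j => ¬ pos.contains j)).map
          (fun j => m.getD j ' '))
      = Cchr d (m.drop a) := by
  match d with
  | [] =>
      rw [show Cpos m [] (List.range' a (m.length - a)) = [[]] from by rw [Cpos]]
      rw [show Cchr [] (m.drop a) = [m.drop a] from by rw [Cchr]]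
      rw [List.map_singleton]
      rw [show (List.range' a (m.length - a)).filter (fun j => ¬ (([] : List Nat).contains j))
            = List.range' a (m.length - a) from by simp]
      rw [map_getD_range']
  | c :: d' =>
      by_cases ha : a < m.length
      · have hn : m.length - a = (m.length - (a + 1)) + 1 := by omega
        have hr : List.range' a (m.length - a) = a :: List.range' (a + 1) (m.length - (a + 1)) := by
          rw [hn, List.range'_succ]
        have hd : m.drop a = m.getD a ' ' :: m.drop (a + 1) := by
          rw [List.drop_eq_getElem_cons ha, List.getD_eq_getElem?_getD,
            List.getElem?_eq_getElem ha]
          rfl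
        have hbound : ∀ (dd : List Char) (pos : List Nat),
            pos ∈ Cpos m dd (List.range' (a + 1) (m.length - (a + 1))) → a ∉ pos := by
          intro dd pos hpos hm
          have h1 := mem_Cpos_mem m dd _ pos hpos a hm
          have h2 := List.mem_range'_1.mp h1
          omega
        rw [hr, hd]
        rw [show Cpos m (c :: d') (a :: List.range' (a + 1) (m.length - (a + 1))) =
              (if m.getD a ' ' = c then
                  (Cpos m d' (List.range' (a + 1) (m.length - (a + 1)))).map (a :: ·) else [])
                ++ Cpos m (c :: d') (List.range' (a + 1) (m.length - (a + 1))) from by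
          rw [Cpos]]
        rw [show Cchr (c :: d') (m.getD a ' ' :: m.drop (a + 1)) =
              (if m.getD a ' ' = c then Cchr d' (m.drop (a + 1)) else [])
                ++ (Cchr (c :: d') (m.drop (a + 1))).map (m.getD a ' ' :: ·) from by
          rw [Cchr]]
        rw [List.map_append]
        congr 1
        · by_cases hy : m.getD a ' ' = c
          · rw [if_pos hy, if_pos hy]
            rw [List.map_map]
            rw [← Cpos_leftover m d' (a + 1)]
            apply List.map_congr_left
            intro q hq
            have haq : a ∉ q := hbound d' q hq
            simp only [Function.comp_apply]
            rw [show (a :: List.range' (a + 1) (m.length - (a + 1))).filter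
                  (fun j => ¬ ((a :: q).contains j)) =
                (List.range' (a + 1) (m.length - (a + 1))).filter (fun j => ¬ (q.contains j)) from by
              rw [List.filter_cons]
              rw [if_neg (by simp)]
              apply List.filter_congr
              intro j hj
              have hj1 := (List.mem_range'_1.mp hj).1
              simp
              intro _
              omega]
          · rw [if_neg hy, if_neg hy]; simp
        · rw [← Cpos_leftover m (c :: d') (a + 1)]
          rw [List.map_map]
          apply List.map_congr_left
          intro q hq
          have haq : a ∉ q := hbound (c :: d') q hq
          simp only [Function.comp_apply]
          rw [List.filter_cons]
          rw [if_pos (by simp [haq])]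
          rw [List.map_cons]
      · have h0 : m.length - a = 0 := by omega
        have hdrop : m.drop a = [] := List.drop_eq_nil_of_le (by omega)
        rw [h0, hdrop]
        rw [show Cpos m (c :: d') (List.range' a 0) = [] from by
          rw [List.range'_zero, Cpos]]
        rw [show Cchr (c :: d') [] = [] from by rw [Cchr]]
        rfl
  termination_by (d.length, m.length - a)
  decreasing_by
    all_goals simp_wf
    all_goals omega

theorem Epat_eq_Cchr (d pre suf : List Char) :
    Epat d pre suf =
      (Cchr d suf).flatMap (fun t => if pre ++ t ≠ [] then [pyInt (pre ++ t)] else []) := by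
  match d, suf with
  | [], suf => rw [Epat, Cchr]; simp
  | c :: d', [] => rw [Epat, Cchr]; simp
  | c :: d', u :: rest =>
      rw [show Epat (c :: d') pre (u :: rest) =
            (if u = c then Epat d' pre rest else []) ++ Epat (c :: d') (pre ++ [u]) rest from by
        rw [Epat]]
      rw [show Cchr (c :: d') (u :: rest) =
            (if u = c then Cchr d' rest else []) ++ (Cchr (c :: d') rest).map (u :: ·) from by
        rw [Cchr]]
      rw [List.flatMap_append]
      congr 1
      · by_cases hu : u = c
        · rw [if_pos hu, if_pos hu]
          exact Epat_eq_Cchr d' pre rest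
        · rw [if_neg hu, if_neg hu]; simp
      · rw [Epat_eq_Cchr (c :: d') (pre ++ [u]) rest]
        rw [List.flatMap_map]
        apply List.flatMap_congr
        intro t ht
        simp
  termination_by (d.length, suf.length)
  decreasing_by
    all_goals simp_wf
    all_goals omega

-- B's inner fold = one Set.update with the flat value list
theorem foldl_addIf_update (m s : List Char) (l : List (List Nat)) (acc : List Int) :
    l.foldl (fun x pos =>
        if pos.map (fun j => m.getD j ' ') = s then
          let rest := ((List.range m.length).filter (fun j => ¬ pos.contains j)).map (fun j => m.getD j ' ')
          if rest ≠ [] then PySem.Set.add x (pyInt rest) else x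
        else x) acc
      = PySem.Set.update acc (l.flatMap (fun pos =>
          if pos.map (fun j => m.getD j ' ') = s then
            let rest := ((List.range m.length).filter (fun j => ¬ pos.contains j)).map (fun j => m.getD j ' ')
            if rest ≠ [] then [pyInt rest] else []
          else [])) := by
  have hbody : ∀ (x : List Int) (pos : List Nat),
      (if pos.map (fun j => m.getD j ' ') = s then
          let rest := ((List.range m.length).filter (fun j => ¬ pos.contains j)).map (fun j => m.getD j ' ')
          if rest ≠ [] then PySem.Set.add x (pyInt rest) else x
        else x)
      = PySem.Set.update x
          (if pos.map (fun j => m.getD j ' ') = s then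
            let rest := ((List.range m.length).filter (fun j => ¬ pos.contains j)).map (fun j => m.getD j ' ')
            if rest ≠ [] then [pyInt rest] else []
          else []) := by
    intro x pos
    by_cases hsp : pos.map (fun j => m.getD j ' ') = s
    · rw [if_pos hsp, if_pos hsp]
      show (if ((List.range m.length).filter (fun j => ¬ pos.contains j)).map (fun j => m.getD j ' ') ≠ [] then
          PySem.Set.add x (pyInt (((List.range m.length).filter (fun j => ¬ pos.contains j)).map (fun j => m.getD j ' '))) else x)
        = PySem.Set.update x
            (if ((List.range m.length).filter (fun j => ¬ pos.contains j)).map (fun j => m.getD j ' ') ≠ [] then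
              [pyInt (((List.range m.length).filter (fun j => ¬ pos.contains j)).map (fun j => m.getD j ' '))] else [])
      by_cases hr : ((List.range m.length).filter (fun j => ¬ pos.contains j)).map (fun j => m.getD j ' ') ≠ []
      · rw [if_pos hr, if_pos hr]; rfl
      · rw [if_neg hr, if_neg hr]; rfl
    · rw [if_neg hsp, if_neg hsp]; rfl
  induction l generalizing acc with
  | nil => simp [PySem.Set.update]
  | cons pos l ih =>
      rw [List.foldl_cons, hbody, ih, List.flatMap_cons, update_append_int]

theorem flatMap_if_filter (l : List (List Nat)) (p : List Nat → Prop) [DecidablePred p]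
    (h : List Nat → List Int) :
    (l.flatMap fun x => if p x then h x else []) =
      (l.filter (fun x => decide (p x))).flatMap h := by
  induction l with
  | nil => rfl
  | cons x l ih =>
      rw [List.flatMap_cons, List.filter_cons]
      by_cases hx : p x
      · simp only [hx, if_true, decide_true, List.flatMap_cons, ih]
      · simp only [hx, if_false, decide_false, ih]
        simp

-- per-divisor: B's value list = Epat s [] m
theorem Bvals_eq_Epat (m s : List Char) :
    ((combosB (List.range m.length) s.length).flatMap (fun pos =>
        if pos.map (fun j => m.getD j ' ') = s then
          let rest := ((List.range m.length).filter (fun j => ¬ pos.contains j)).map (fun j => m.getD j ' ')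
          if rest ≠ [] then [pyInt rest] else []
        else []))
      = Epat s [] m := by
  rw [flatMap_if_filter]
  rw [combosB_filter]
  rw [Epat_eq_Cchr]
  have h0 : List.range m.length = List.range' 0 (m.length - 0) := by
    rw [Nat.sub_zero, List.range_eq_range']
  rw [h0]
  rw [show m = m.drop 0 from rfl, ← Cpos_leftover m s 0]
  rw [List.flatMap_map]
  apply List.flatMap_congr
  intro t ht
  simp

-- A's whole fold, reshaped to a fold of updates over the raw ps-list
theorem foldl_append_if_eq (cond : Int → Bool) (g : Int → List Int) :
    ∀ (l : List Int) (x0 : List Int),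
      l.foldl (fun x i => if cond i then x ++ g i else x) x0 =
        x0 ++ l.flatMap (fun i => if cond i then g i else []) := by
  intro l
  induction l with
  | nil => simp
  | cons i l ih =>
      intro x0
      rw [List.foldl_cons, List.flatMap_cons, ih]
      by_cases hi : cond i
      · simp [hi]
      · simp [hi]

theorem update_flatMap_int (h : Int → List Int) :
    ∀ (l : List Int) (acc : List Int),
      PySem.Set.update acc (l.flatMap h) =
        l.foldl (fun a i => PySem.Set.update a (h i)) acc := by
  intro l
  induction l with
  | nil => intro acc; simp [PySem.Set.update]
  | cons i l ih =>
      intro acc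
      rw [List.flatMap_cons, update_append_int, ih]
      rfl

theorem xsf_eq_fold (n : Int) :
    xsf n = (psA n).foldl (fun acc i =>
      if decide (i < n) && decide (1 < i) && decide (PySem.Int.mod n i = 0) then
        PySem.Set.update acc (btA (PySem.Int.toChars i).reverse 0 (PySem.Int.toChars n))
      else acc) [] := by
  show PySem.Set.ofList _ = _
  rw [List.foldl_map]
  rw [List.foldl_filter]
  rw [foldl_append_if_eq, List.nil_append]
  rw [← PySem.Set.update_nil_left]
  rw [update_flatMap_int]
  have hfun : (fun (a : List Int) (i : Int) =>
        PySem.Set.update a (if decide (i < n) && decide (1 < i) && decide (PySem.Int.mod n i = 0)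
          then btA (PySem.Int.toChars i).reverse 0 (PySem.Int.toChars n) else []))
      = (fun (a : List Int) (i : Int) =>
        if decide (i < n) && decide (1 < i) && decide (PySem.Int.mod n i = 0)
          then PySem.Set.update a (btA (PySem.Int.toChars i).reverse 0 (PySem.Int.toChars n))
          else a) := by
    funext a i
    by_cases hi : (decide (i < n) && decide (1 < i) && decide (PySem.Int.mod n i = 0)) = true
    · simp [hi]
    · simp only [Bool.not_eq_true] at hi
      simp [hi, PySem.Set.update]
  rw [hfun]

-- ===== VERDICT (by name: the statement is the Claim_ definition above) =====
theorem xsf_spec : Claim_equal_xsf := by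
  intro n _ _
  show xsf n = xsf_alt n
  rw [xsf_eq_fold]
  show _ = (psA n).foldl _ PySem.Set.empty
  have hfun : (fun (acc : List Int) (i : Int) =>
      if decide (i < n) && decide (1 < i) && decide (PySem.Int.mod n i = 0) then
        PySem.Set.update acc (btA (PySem.Int.toChars i).reverse 0 (PySem.Int.toChars n))
      else acc)
    = (fun (acc : List Int) (i : Int) =>
      if decide (i < n) && decide (1 < i) && decide (PySem.Int.mod n i = 0) then
        (combosB (List.range (PySem.Int.toChars n).length) (PySem.Int.toChars i).length).foldl
          (fun x pos =>
            if pos.map (fun j => (PySem.Int.toChars n).getD j ' ') = PySem.Int.toChars i then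
              let rest := ((List.range (PySem.Int.toChars n).length).filter
                (fun j => ¬ pos.contains j)).map (fun j => (PySem.Int.toChars n).getD j ' ')
              if rest ≠ [] then PySem.Set.add x (pyInt rest) else x
            else x) acc
      else acc) := by
    funext acc i
    by_cases hi : (decide (i < n) && decide (1 < i) && decide (PySem.Int.mod n i = 0)) = true
    · rw [if_pos hi, if_pos hi]
      rw [foldl_addIf_update, Bvals_eq_Epat]
      have := btA_update (PySem.Int.toChars i) [] (PySem.Int.toChars n) acc
      simpa using this
    · simp only [Bool.not_eq_true] at hi
      rw [if_neg (by simp [hi]), if_neg (by simp [hi])]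
  rw [hfun]
  rfl
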